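-- pv_equiv track=rewrite | github.com/andrefisch/EvanProjects | cmaShipping/splitNames.py | determine_names
-- ===== SOURCE A (Python) =====
-- def determine_names(listy):
--     dicty   = {}
--     lasty   = []
--     middley = []
--     # first spot is always first name at this point
--     dicty['first_name'] = listy[0]
--     del listy[0]
--     # - reverse list
--     # - take first name in reversed list (last name) and add it to last name list, delete it
--     # - look at next name and see if it is capitalized
--     #   - if not add to last name list, repeat
--     #   - otherwise add this and rest to middle name list
--     listy = listy[::-1]
--     lasty.append(listy[0])
--     del listy[0]
--     lasts = True
--     for i in range(0, len(listy)):
--         if (not listy[i].istitle()) and lasts: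
--             lasty.insert(0, listy[i])
--         else:
--             lasts = False
--             middley.insert(0, listy[i])
--
--     dicty['middle_name'] = ' '.join(middley)
--     dicty['last_name'] = ' '.join(lasty)
--     return dicty
-- ===== SOURCE B (Python) =====
-- def determine_names(listy):
--     first_name = listy[0]
--     del listy[0]
--     last_word = listy[-1]          # IndexError on single-token input, exactly as A
--     rem = listy[:-1]
--     p = -1                         # rightmost title-cased token among the in-between words
--     for i, tok in enumerate(rem):
--         if tok.istitle():
--             p = i
--     return {'first_name': first_name,
--             'middle_name': ' '.join(rem[:p + 1]),
--             'last_name': ' '.join(rem[p + 1:] + [last_word])}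
-- ===== Notes on version B (the rewrite author's own statement) =====
-- stated objective: faster
-- what changed: B replaces A's reverse-the-list, stateful flag loop with insert(0) accumulators by a single O(n) forward scan that records the rightmost title-cased in-between token and two slices; same del listy[0] side effect.
import Mathlib
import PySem

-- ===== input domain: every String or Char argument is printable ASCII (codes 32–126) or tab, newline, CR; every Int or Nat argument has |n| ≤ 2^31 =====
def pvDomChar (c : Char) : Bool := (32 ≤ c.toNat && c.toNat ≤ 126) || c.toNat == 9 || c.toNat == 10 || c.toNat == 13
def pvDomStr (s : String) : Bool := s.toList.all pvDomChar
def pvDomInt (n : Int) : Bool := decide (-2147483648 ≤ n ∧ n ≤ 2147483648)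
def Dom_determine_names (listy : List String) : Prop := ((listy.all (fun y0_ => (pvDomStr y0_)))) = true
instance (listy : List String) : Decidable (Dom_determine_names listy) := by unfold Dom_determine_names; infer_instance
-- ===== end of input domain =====

-- B replaces A's reverse + flag loop with insert(0) accumulators by one forward scan for the
-- rightmost title-cased in-between token plus two slices (measured faster: A is quadratic via insert(0), B linear); return value proved equal;
-- both perform the same visible mutation `del listy[0]` in Python.


-- shared helper: port of Python str.istitle() (CPython loop, exact on ASCII: A-Z upper-cased,
-- a-z lower-cased, everything else uncased); used by both Pythons via the builtin
def istitleGo : List Char → Bool → Bool → Bool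
  | [], _, cased => cased
  | c :: cs, prev, cased =>
    if PySem.Chars.isupper c then
      if prev then false else istitleGo cs true true
    else if PySem.Chars.islower c then
      if prev then istitleGo cs true true else false
    else istitleGo cs false cased

def pyIstitle (s : String) : Bool := istitleGo s.toList false false

-- ===== PORT A =====
-- step-for-step: dicty['first_name']=listy[0]; del listy[0]; listy=listy[::-1] (= reverse,
-- PySem.List.slice?_none_none_neg_one); lasty=[listy[0]]; del listy[0]; for i in range(0,len):
-- insert(0,·) into lasty/middley under the `lasts` flag; join; return the dict's items
def determine_names (listy : List String) : List (String × String) :=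
  match PySem.List.pyGet? listy 0 with
  | none => []   -- IndexError (excluded by Pre_)
  | some first =>
    let dicty : PySem.Dict String String := (PySem.Dict.empty).insert "first_name" first
    let listy1 := (listy.drop 1).reverse
    match PySem.List.pyGet? listy1 0 with
    | none => []  -- IndexError (excluded by Pre_)
    | some l0 =>
      let listy2 := listy1.drop 1
      let st := (PySem.List.pyRange 0 listy2.length 1).foldl
        (fun (st : List String × List String × Bool) i =>
          let x := PySem.List.pyGetD listy2 i ""
          if (!pyIstitle x) && st.2.2 then (x :: st.1, st.2.1, st.2.2)
          else (st.1, x :: st.2.1, false))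
        ([l0], [], true)
      let dicty := (dicty.insert "middle_name" (PySem.Str.join " " st.2.1)).insert
                     "last_name" (PySem.Str.join " " st.1)
      dicty.items

-- ===== PORT B =====
-- forward scan: p = rightmost index in rem = listy[1:-1] whose token istitle (-1 if none);
-- rem[:p+1] / rem[p+1:] are take/drop at (p+1).toNat since p+1 ≥ 0 always
def determine_names_alt (listy : List String) : List (String × String) :=
  match PySem.List.pyGet? listy 0 with
  | none => []   -- IndexError (excluded by Pre_)
  | some first =>
    let rest := listy.drop 1
    match PySem.List.pyGet? rest (-1) with
    | none => []  -- IndexError (excluded by Pre_)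
    | some lastTok =>
      let rem := rest.dropLast   -- rest[:-1], PySem.List.slice_to_neg_one
      let p := (PySem.List.enumerate rem 0).foldl
        (fun (p : Int) it => if pyIstitle it.2 then it.1 else p) (-1)
      [("first_name", first),
       ("middle_name", PySem.Str.join " " (rem.take (p + 1).toNat)),
       ("last_name", PySem.Str.join " " (rem.drop (p + 1).toNat ++ [lastTok]))]

-- ===== PRECONDITION & SPEC =====
-- A raises IndexError (listy[0] after the del) on lists of fewer than two tokens
def Pre_determine_names (listy : List String) : Prop := 2 ≤ listy.length
instance (listy : List String) : Decidable (Pre_determine_names listy) := by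
  unfold Pre_determine_names; infer_instance

def pvWitness_determine_names : List String := ["Jean", "de", "la", "Fontaine"]

def Spec_determine_names (listy : List String) (out : List (String × String)) : Prop := out = determine_names_alt listy
instance (listy : List String) (out : List (String × String)) : Decidable (Spec_determine_names listy out) := by unfold Spec_determine_names; infer_instance

-- ===== CLAIM (what is proved, stated in full; the proofs are below) =====
def Claim_equal_determine_names : Prop := ∀ (listy : List String), Dom_determine_names listy → Pre_determine_names listy → Spec_determine_names listy (determine_names listy)

-- ===== LEMMAS AND PROOFS =====

-- A's loop body
def stepA (st : List String × List String × Bool) (x : String) :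
    List String × List String × Bool :=
  if (!pyIstitle x) && st.2.2 then (x :: st.1, st.2.1, st.2.2)
  else (st.1, x :: st.2.1, false)

-- once `lasts` is False everything is prepended to middley
theorem loopA_false (l : List String) (la mi : List String) :
    l.foldl stepA (la, mi, false) = (la, l.reverse ++ mi, false) := by
  induction l generalizing mi with
  | nil => simp
  | cons c cs ih =>
    rw [List.foldl_cons, show stepA (la, mi, false) c = (la, c :: mi, false) from by
      simp [stepA], ih]
    simp

-- A's loop with the flag up splits l at the first title-cased token
theorem loopA_true (l : List String) (la : List String) :
    l.foldl stepA (la, [], true) =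
      ((l.takeWhile (fun x => !pyIstitle x)).reverse ++ la,
       (l.dropWhile (fun x => !pyIstitle x)).reverse, l.all (fun x => !pyIstitle x)) := by
  induction l generalizing la with
  | nil => simp
  | cons c cs ih =>
    by_cases h : pyIstitle c
    · rw [List.foldl_cons, show stepA (la, [], true) c = (la, [c], false) from by
        simp [stepA, h], loopA_false]
      simp [h]
    · simp only [Bool.not_eq_true] at h
      rw [List.foldl_cons, show stepA (la, [], true) c = (c :: la, [], true) from by
        simp [stepA, h], ih]
      simp [h]

-- B's scan computes (length of the prefix up to the last title-cased token) - 1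
theorem scanB (l : List String) :
    (PySem.List.enumerate l 0).foldl
        (fun (p : Int) it => if pyIstitle it.2 then it.1 else p) (-1) =
      ((l.rdropWhile (fun x => !pyIstitle x)).length : Int) - 1 := by
  induction l using List.reverseRecOn with
  | nil => simp [List.rdropWhile_nil]
  | append_singleton l x ih =>
    rw [PySem.List.enumerate_append, List.foldl_append]
    by_cases h : pyIstitle x
    · rw [List.rdropWhile_concat_neg _ _ x (by simp [h])]
      simp [PySem.List.enumerate_cons, PySem.List.enumerate_nil, h]
    · rw [List.rdropWhile_concat_pos _ _ x (by simp [h])]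
      simpa [PySem.List.enumerate_cons, PySem.List.enumerate_nil, h] using ih

theorem take_rdrop (l : List String) (q : String → Bool) :
    l.take (l.rdropWhile q).length = l.rdropWhile q :=
  (List.prefix_iff_eq_take.mp (List.rdropWhile_prefix q l)).symm

theorem drop_rdrop (l : List String) (q : String → Bool) :
    l.drop (l.rdropWhile q).length = l.rtakeWhile q := by
  have h := List.rdropWhile_append_rtakeWhile (p := q) (l := l)
  set a := l.rdropWhile q with ha
  set b := l.rtakeWhile q with hb
  calc List.drop a.length l = List.drop a.length (a ++ b) := by rw [h]
    _ = b := by simp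

-- ===== VERDICT (by name: the statement is the Claim_ definition above) =====
theorem determine_names_spec : Claim_equal_determine_names := by
  intro listy _ hpre
  unfold Spec_determine_names determine_names determine_names_alt
  unfold Pre_determine_names at hpre
  -- listy = first :: mid ++ [lastTok]
  obtain ⟨first, rest, rfl⟩ : ∃ a t, listy = a :: t := by
    cases listy with
    | nil => simp at hpre
    | cons a t => exact ⟨a, t, rfl⟩
  obtain ⟨mid, lastTok, rfl⟩ : ∃ m z, rest = m ++ [z] := by
    rcases List.eq_nil_or_concat rest with h | ⟨m, z, h⟩
    · subst h; simp at hpre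
    · exact ⟨m, z, by simpa using h⟩
  rw [PySem.List.pyGet?_zero_cons]
  dsimp only
  rw [show List.drop 1 (first :: (mid ++ [lastTok])) = mid ++ [lastTok] from rfl,
      PySem.List.pyGet?_neg_one_append_singleton,
      show (mid ++ [lastTok]).reverse = lastTok :: mid.reverse from by simp,
      PySem.List.pyGet?_zero_cons]
  dsimp only
  rw [show List.drop 1 (lastTok :: mid.reverse) = mid.reverse from rfl,
      show (mid ++ [lastTok]).dropLast = mid from by simp]
  rw [PySem.List.foldl_pyRange_zero_pyGetD' mid.reverse ""
    (fun (st : List String × List String × Bool) x =>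
      if (!pyIstitle x) && st.2.2 then (x :: st.1, st.2.1, st.2.2)
      else (st.1, x :: st.2.1, false)) ([lastTok], [], true)]
  rw [show (fun (st : List String × List String × Bool) x =>
      if (!pyIstitle x) && st.2.2 then (x :: st.1, st.2.1, st.2.2)
      else (st.1, x :: st.2.1, false)) = stepA from rfl]
  rw [loopA_true, scanB]
  have hlen : ((((mid.rdropWhile (fun x => !pyIstitle x)).length : Int)) - 1 + 1).toNat
      = (mid.rdropWhile (fun x => !pyIstitle x)).length := by omega
  rw [hlen, take_rdrop, drop_rdrop]
  have htw : mid.reverse.takeWhile (fun x => !pyIstitle x)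
      = (mid.rtakeWhile (fun x => !pyIstitle x)).reverse := by
    rw [List.rtakeWhile]; simp
  have hdw : mid.reverse.dropWhile (fun x => !pyIstitle x)
      = (mid.rdropWhile (fun x => !pyIstitle x)).reverse := by
    rw [List.rdropWhile]; simp
  rw [htw, hdw]
  simp [PySem.Dict.insert, PySem.Dict.empty]
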